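-- pv_equiv track=rewrite | github.com/memcfaul/exogene | source/xo_ape.py | deg_replace
-- ===== SOURCE A (Python) =====
-- def deg_replace(subs):
--     deg_substring = ''
--     replace_dict = {'B':'[CGTBSKY]','D':'[AGTDRWK]','H':'[ACTHMYW]','K':'[GTK]','M':'[ACM]','N':'[ACGTBDHKMNRSVWY]','R':'[AGR]','S':'[CGS]','V':'[ACGVMSR]','W':'[ATW]','Y':'[CTY]',}
--     change = True
--     for i in subs:
--         if i == '[':
--             change = False
--         elif i == ']':
--             change = True
--         if change:
--             i = replace_dict.get(i.upper(),i)
--         deg_substring += i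
--     return deg_substring
-- ===== SOURCE B (Python) =====
-- _REP = {'B': '[CGTBSKY]', 'D': '[AGTDRWK]', 'H': '[ACTHMYW]', 'K': '[GTK]',
--         'M': '[ACM]', 'N': '[ACGTBDHKMNRSVWY]', 'R': '[AGR]', 'S': '[CGS]',
--         'V': '[ACGVMSR]', 'W': '[ATW]', 'Y': '[CTY]'}
-- _TABLE = {}
-- for _k, _v in _REP.items():
--     _TABLE[ord(_k)] = _v
--     _TABLE[ord(_k.lower())] = _v
--
--
-- def deg_replace(subs):
--     # segment-wise: translate runs outside brackets, copy bracketed runs verbatim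
--     out = []
--     rest = subs
--     while True:
--         head, lb, rest = rest.partition('[')
--         out.append(head.translate(_TABLE))
--         if not lb:
--             return ''.join(out)
--         body, rb, rest = rest.partition(']')
--         out.append(lb + body + rb)
-- ===== Notes on version B (the rewrite author's own statement) =====
-- stated objective: idiomatic
-- what changed: Replaces A's per-character loop with a change flag by a segment-wise traversal: str.partition splits off each bracketed run, runs outside brackets go through a precomputed str.translate table (with both upper- and lower-case keys), bracketed runs are copied verbatim.
import Mathlib
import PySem

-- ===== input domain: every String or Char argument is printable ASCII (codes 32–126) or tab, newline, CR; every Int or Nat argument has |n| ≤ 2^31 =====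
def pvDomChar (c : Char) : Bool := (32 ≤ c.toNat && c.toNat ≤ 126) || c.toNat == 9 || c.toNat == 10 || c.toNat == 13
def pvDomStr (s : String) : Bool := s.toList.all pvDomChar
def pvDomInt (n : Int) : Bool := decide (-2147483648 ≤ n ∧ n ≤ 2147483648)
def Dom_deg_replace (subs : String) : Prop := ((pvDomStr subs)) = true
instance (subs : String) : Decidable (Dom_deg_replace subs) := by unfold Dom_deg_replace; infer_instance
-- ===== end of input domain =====

-- B rewrites A's per-character state-machine loop as a segment-wise traversal
-- (str.partition into bracketed runs + a translation table); objective: idiomatic (measured faster by a constant factor).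

-- ===== PORT A =====
-- replace_dict.get of an (already uppercased) character
def degDict (c : Char) : Option (List Char) :=
  if c = 'B' then some "[CGTBSKY]".toList
  else if c = 'D' then some "[AGTDRWK]".toList
  else if c = 'H' then some "[ACTHMYW]".toList
  else if c = 'K' then some "[GTK]".toList
  else if c = 'M' then some "[ACM]".toList
  else if c = 'N' then some "[ACGTBDHKMNRSVWY]".toList
  else if c = 'R' then some "[AGR]".toList
  else if c = 'S' then some "[CGS]".toList
  else if c = 'V' then some "[ACGVMSR]".toList
  else if c = 'W' then some "[ATW]".toList
  else if c = 'Y' then some "[CTY]".toList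
  else none

-- one step of A's loop body (state = accumulated output, change flag)
def stepA (st : List Char × Bool) (i : Char) : List Char × Bool :=
  let change := if i = '[' then false else if i = ']' then true else st.2
  let piece := if change then (degDict (PySem.Chars.upperChar i)).getD [i] else [i]
  (st.1 ++ piece, change)

def deg_replace (subs : String) : String :=
  String.mk ((subs.toList.foldl stepA ([], true)).1)

-- ===== PORT B =====
-- B's translation table: both upper- and lower-case keys map to the class
def tableB (c : Char) : Option (List Char) :=
  if c = 'B' ∨ c = 'b' then some "[CGTBSKY]".toList
  else if c = 'D' ∨ c = 'd' then some "[AGTDRWK]".toList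
  else if c = 'H' ∨ c = 'h' then some "[ACTHMYW]".toList
  else if c = 'K' ∨ c = 'k' then some "[GTK]".toList
  else if c = 'M' ∨ c = 'm' then some "[ACM]".toList
  else if c = 'N' ∨ c = 'n' then some "[ACGTBDHKMNRSVWY]".toList
  else if c = 'R' ∨ c = 'r' then some "[AGR]".toList
  else if c = 'S' ∨ c = 's' then some "[CGS]".toList
  else if c = 'V' ∨ c = 'v' then some "[ACGVMSR]".toList
  else if c = 'W' ∨ c = 'w' then some "[ATW]".toList
  else if c = 'Y' ∨ c = 'y' then some "[CTY]".toList
  else none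

-- str.translate with tableB
def transB (c : Char) : List Char := (tableB c).getD [c]

-- the while loop of B: partition on '[' (= span), translate the head, copy the
-- bracketed body up to and including the first ']', recurse on the remainder
def goB (l : List Char) : List Char :=
  (l.takeWhile (· ≠ '[')).flatMap transB ++
    (match h1 : l.dropWhile (· ≠ '[') with
     | [] => []
     | lb :: r1 =>
       lb :: ((r1.takeWhile (· ≠ ']')) ++
         (match h2 : r1.dropWhile (· ≠ ']') with
          | [] => []
          | rb :: r2 => rb :: goB r2)))
termination_by l.length
decreasing_by
  have e1 : (l.dropWhile (· ≠ '[')).length ≤ l.length := List.length_dropWhile_le _ _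
  have e2 : (r1.dropWhile (· ≠ ']')).length ≤ r1.length := List.length_dropWhile_le _ _
  rw [h1] at e1; rw [h2] at e2; simp at e1 e2; omega

def deg_replace_alt (subs : String) : String :=
  String.mk (goB subs.toList)

-- ===== PRECONDITION & SPEC =====
def Spec_deg_replace (subs : String) (out : String) : Prop := out = deg_replace_alt subs
instance (subs : String) (out : String) : Decidable (Spec_deg_replace subs out) := by unfold Spec_deg_replace; infer_instance

-- ===== CLAIM (what is proved, stated in full; the proofs are below) =====
def Claim_equal_deg_replace : Prop := ∀ (subs : String), Dom_deg_replace subs → Spec_deg_replace subs (deg_replace subs)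

-- ===== LEMMAS AND PROOFS =====

-- A's per-character translation (applied when change = true)
def transA (c : Char) : List Char := (degDict (PySem.Chars.upperChar c)).getD [c]

-- A's loop as a structural recursion over the characters
def goA : Bool → List Char → List Char
  | _, [] => []
  | ch, i :: rest =>
    let change := if i = '[' then false else if i = ']' then true else ch
    let piece := if change then transA i else [i]
    piece ++ goA change rest

lemma foldl_stepA (l : List Char) (acc : List Char) (ch : Bool) :
    (l.foldl stepA (acc, ch)).1 = acc ++ goA ch l := by
  induction l generalizing acc ch with
  | nil => simp [goA]
  | cons i rest ih =>
    simp only [List.foldl_cons, goA, stepA, transA]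
    rw [ih]; simp

lemma eq_of_toNat_eq {a b : Char} (h : a.toNat = b.toNat) : a = b := by
  apply Char.ext
  exact UInt32.toNat_inj.mp h

lemma upperChar_ne (c u lo : Char) (hc1 : c ≠ u) (hc2 : c ≠ lo)
    (h : u.toNat + 32 = lo.toNat) (hrange : 65 ≤ u.toNat ∧ u.toNat ≤ 90) :
    PySem.Chars.upperChar c ≠ u := by
  unfold PySem.Chars.upperChar PySem.Chars.islower
  split
  · rename_i hl
    simp only [Bool.and_eq_true, decide_eq_true_eq] at hl
    have h1 : 97 ≤ c.toNat := Fin.mk_le_mk.mp hl.1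
    have h2 : c.toNat ≤ 122 := Fin.mk_le_mk.mp hl.2
    intro he
    have : (Char.ofNat (c.toNat - 32)).toNat = u.toNat := by rw [he]
    rw [Char.toNat_ofNat] at this
    have hv : (c.toNat - 32).isValidChar := by
      constructor <;> omega
    rw [if_pos hv] at this
    exact hc2 (eq_of_toNat_eq (by omega))
  · exact hc1

lemma trans_eq (c : Char) : transB c = transA c := by
  by_cases hm : c ∈ ['B','b','D','d','H','h','K','k','M','m','N','n','R','r','S','s','V','v','W','w','Y','y']
  · fin_cases hm <;> decide
  · simp only [List.mem_cons, List.not_mem_nil, or_false] at hm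
    push_neg at hm
    obtain ⟨hB,hb,hD,hd,hH,hh,hK,hk,hM,hm2,hN,hn,hR,hr,hS,hs,hV,hv,hW,hw,hY,hy⟩ := hm
    have nB := upperChar_ne c 'B' 'b' hB hb (by decide) (by decide)
    have nD := upperChar_ne c 'D' 'd' hD hd (by decide) (by decide)
    have nH := upperChar_ne c 'H' 'h' hH hh (by decide) (by decide)
    have nK := upperChar_ne c 'K' 'k' hK hk (by decide) (by decide)
    have nM := upperChar_ne c 'M' 'm' hM hm2 (by decide) (by decide)
    have nN := upperChar_ne c 'N' 'n' hN hn (by decide) (by decide)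
    have nR := upperChar_ne c 'R' 'r' hR hr (by decide) (by decide)
    have nS := upperChar_ne c 'S' 's' hS hs (by decide) (by decide)
    have nV := upperChar_ne c 'V' 'v' hV hv (by decide) (by decide)
    have nW := upperChar_ne c 'W' 'w' hW hw (by decide) (by decide)
    have nY := upperChar_ne c 'Y' 'y' hY hy (by decide) (by decide)
    simp [transA, transB, tableB, degDict,
      hB, hb, hD, hd, hH, hh, hK, hk, hM, hm2, hN, hn, hR, hr, hS, hs,
      hV, hv, hW, hw, hY, hy, nB, nD, nH, nK, nM, nN, nR, nS, nV, nW, nY]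

lemma transA_rbracket : transA ']' = [']'] := by decide

lemma goA_true (l : List Char) :
    goA true l = (l.takeWhile (· ≠ '[')).flatMap transA ++
      (match l.dropWhile (· ≠ '[') with
       | [] => []
       | lb :: r => lb :: goA false r) := by
  induction l with
  | nil => simp [goA]
  | cons i rest ih =>
    by_cases hi : i = '['
    · subst hi
      simp [goA, List.takeWhile, List.dropWhile]
    · rw [List.takeWhile_cons_of_pos (by simpa using hi),
        List.dropWhile_cons_of_pos (by simpa using hi)]
      by_cases hr : i = ']'
      · subst hr
        simp [goA, ih, transA_rbracket, List.append_assoc]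
      · simp only [goA, if_neg hi, if_neg hr, if_true]
        rw [ih]; simp

lemma goA_false (l : List Char) :
    goA false l = l.takeWhile (· ≠ ']') ++
      (match l.dropWhile (· ≠ ']') with
       | [] => []
       | rb :: r => rb :: goA true r) := by
  induction l with
  | nil => simp [goA]
  | cons i rest ih =>
    by_cases hi : i = ']'
    · subst hi
      simp [goA, List.takeWhile, List.dropWhile, transA_rbracket]
    · rw [List.takeWhile_cons_of_pos (by simpa using hi),
        List.dropWhile_cons_of_pos (by simpa using hi)]
      by_cases hb : i = '['
      · subst hb
        simp [goA, ih, List.append_assoc]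
      · simp only [goA, if_neg hb, if_neg hi, if_false]
        rw [ih]; simp

lemma goB_eq_goA (l : List Char) : goB l = goA true l := by
  induction l using goB.induct with
  | case1 l ih =>
    rw [goB, goA_true, show transB = transA from funext trans_eq]
    congr 1
    split
    · rename_i heq; rw [heq]
    · rename_i lb r1 heq1
      rw [heq1]
      show _ = lb :: goA false r1
      rw [goA_false]
      congr 2
      split
      · rename_i heq2; rw [heq2]
      · rename_i rb r2 heq2
        rw [heq2, ih lb r1 heq1 rb r2 heq2]

-- ===== VERDICT (by name: the statement is the Claim_ definition above) =====
theorem deg_replace_spec : Claim_equal_deg_replace := by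
  intro subs _
  unfold Spec_deg_replace deg_replace deg_replace_alt
  rw [foldl_stepA, goB_eq_goA]
  simp
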